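-- pv_equiv track=rewrite | github.com/thejus-r/base | leetcode/2812-find-the-safest-path-in-a-grid.py | maximumSafenesFactor
-- ===== SOURCE A (Python) =====
-- from collections import deque
-- from heapq import heappop, heappush
-- from typing import List
--
-- def maximumSafenesFactor(grid: List[List[int]]) -> int:
--     n = len(grid)
--
--     # helper
--     def isValidCell(r, c):
--         return 0 <= r < n and 0 <= c < n
--
--     def precompute():
--         q = deque()
--         min_dist = {}
--         for r in range(n):
--             for c in range(n):
--                 if grid[r][c]:
--                     q.append([r, c, 0])
--                     min_dist[(r, c)] = 0
--         while q:
--             r, c, dist = q.popleft()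
--             neighbors = [[r + 1, c], [r - 1, c], [r, c + 1], [r, c - 1]]
--             for nr, nc in neighbors:
--                 if isValidCell(nr, nc) and (nr, nc) not in min_dist:
--                     min_dist[(nr, nc)] = dist + 1
--                     q.append([nr, nc, dist + 1])
--         return min_dist
--
--     min_dist = precompute()
--     maxHeap = [(-min_dist[(0, 0)], 0, 0)]
--     visit = set()
--     visit.add((0, 0))
--     while maxHeap:
--         dist, r, c = heappop(maxHeap)
--         dist = -dist
--         if (r, c) == (n - 1, n - 1):
--             return dist
--         neighbors = [[r + 1, c], [r - 1, c], [r, c + 1], [r, c - 1]]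
--         for nr, nc in neighbors:
--             if isValidCell(nr, nc) and (nr, nc) not in visit:
--                 visit.add((nr, nc))
--                 newDist = min(dist, min_dist[(nr, nc)])
--                 heappush(maxHeap, (-newDist, nr, nc))
--     return -1
-- ===== SOURCE B (Python) =====
-- from collections import deque
-- from typing import List
--
-- def maximumSafenesFactor(grid: List[List[int]]) -> int:
--     n = len(grid)
--
--     # same multi-source BFS as the original: min_dist[cell] = distance to nearest thief
--     q = deque()
--     min_dist = {}
--     for r in range(n):
--         for c in range(n):
--             if grid[r][c]:
--                 q.append([r, c, 0])
--                 min_dist[(r, c)] = 0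
--     while q:
--         r, c, dist = q.popleft()
--         neighbors = [[r + 1, c], [r - 1, c], [r, c + 1], [r, c - 1]]
--         for nr, nc in neighbors:
--             if 0 <= nr < n and 0 <= nc < n and (nr, nc) not in min_dist:
--                 min_dist[(nr, nc)] = dist + 1
--                 q.append([nr, nc, dist + 1])
--
--     # threshold scan: answer = largest t such that start and goal are joined by a
--     # path all of whose cells have min_dist >= t
--     def reachable(t):
--         if min_dist[(0, 0)] < t:
--             return False
--         seen = {(0, 0)}
--         stack = [(0, 0)]
--         while stack:
--             r, c = stack.pop()
--             for nr, nc in ((r + 1, c), (r - 1, c), (r, c + 1), (r, c - 1)):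
--                 if 0 <= nr < n and 0 <= nc < n and (nr, nc) not in seen and min_dist[(nr, nc)] >= t:
--                     seen.add((nr, nc))
--                     stack.append((nr, nc))
--         return (n - 1, n - 1) in seen
--
--     for t in sorted({min_dist[(r, c)] for r in range(n) for c in range(n)}, reverse=True):
--         if reachable(t):
--             return t
--     return -1
-- ===== Notes on version B (the rewrite author's own statement) =====
-- stated objective: alternative
-- what changed: The heap-based best-first (max-min Dijkstra) search over the precomputed safeness grid is replaced by a descending scan over the distinct safeness values with a flood-fill reachability test per threshold (the multi-source BFS computing min_dist is kept unchanged).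
import Mathlib
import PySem

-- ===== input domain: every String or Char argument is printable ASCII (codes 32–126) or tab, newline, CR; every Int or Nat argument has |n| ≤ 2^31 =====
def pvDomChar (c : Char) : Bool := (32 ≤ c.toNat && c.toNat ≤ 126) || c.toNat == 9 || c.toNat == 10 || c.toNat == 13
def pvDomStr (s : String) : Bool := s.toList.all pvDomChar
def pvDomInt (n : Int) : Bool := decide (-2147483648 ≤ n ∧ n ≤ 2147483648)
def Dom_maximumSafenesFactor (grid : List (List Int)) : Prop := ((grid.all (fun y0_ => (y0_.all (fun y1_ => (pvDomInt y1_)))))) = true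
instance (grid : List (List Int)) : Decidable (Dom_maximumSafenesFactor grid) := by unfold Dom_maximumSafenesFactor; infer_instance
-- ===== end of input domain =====

-- B replaces A's heap-based max-min Dijkstra by a descending threshold scan with a
-- flood-fill reachability test (the multi-source BFS for min_dist is kept); objective:
-- alternative algorithm, not claimed faster.

-- ===== PORT A =====
-- isValidCell(r, c)
def pvValid (n r c : Int) : Bool := decide (0 ≤ r) && decide (r < n) && decide (0 ≤ c) && decide (c < n)

-- the four orthogonal neighbours [r+1,c],[r-1,c],[r,c+1],[r,c-1]
def pvNbrs4 (r c : Int) : List (Int × Int) := [(r + 1, c), (r - 1, c), (r, c + 1), (r, c - 1)]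

-- while-loop of precompute(): BFS from the queued thief cells (identical code in Source A and Source B)
def pvBfsLoop (n : Int) : Nat → List (Int × Int × Int) → PySem.Dict (Int × Int) Int → PySem.Dict (Int × Int) Int
  | 0, _, md => md
  | _, [], md => md
  | fuel + 1, (r, c, dist) :: rest, md =>
    let st := (pvNbrs4 r c).foldl (fun (st : List (Int × Int × Int) × PySem.Dict (Int × Int) Int) p =>
      if pvValid n p.1 p.2 && !(st.2.contains p) then
        (st.1 ++ [(p.1, p.2, dist + 1)], st.2.insert p (dist + 1))
      else st) (rest, md)
    pvBfsLoop n fuel st.1 st.2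

-- precompute(): min_dist = distance of every cell to the nearest thief (shared by both ports:
-- Source A and Source B contain this multi-source BFS verbatim)
def pvMinDist (grid : List (List Int)) (n : Int) : PySem.Dict (Int × Int) Int :=
  let init := (PySem.List.pyRange 0 n 1).foldl (fun st r =>
    (PySem.List.pyRange 0 n 1).foldl (fun (st : List (Int × Int × Int) × PySem.Dict (Int × Int) Int) c =>
      if PySem.List.pyGetD (PySem.List.pyGetD grid r []) c 0 ≠ 0 then
        (st.1 ++ [(r, c, 0)], st.2.insert (r, c) 0)
      else st) st) ([], PySem.Dict.empty)
  pvBfsLoop n (2 * n.toNat * n.toNat + 2) init.1 init.2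

-- heapq entries are distinct triples; heappop returns the lexicographically least one
def pvTripLt (a b : Int × Int × Int) : Bool :=
  decide (a.1 < b.1) || (a.1 == b.1 && (decide (a.2.1 < b.2.1) || (a.2.1 == b.2.1 && decide (a.2.2 < b.2.2))))

def pvPopMin : List (Int × Int × Int) → Option ((Int × Int × Int) × List (Int × Int × Int))
  | [] => none
  | x :: xs =>
    match pvPopMin xs with
    | none => some (x, [])
    | some (m, rest) => if pvTripLt m x then some (m, x :: rest) else some (x, xs)

-- while maxHeap: ... (entries stored negated exactly as in the Python)
def pvDijkstra (n : Int) (md : PySem.Dict (Int × Int) Int) : Nat → List (Int × Int × Int) → PySem.Set (Int × Int) → Int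
  | 0, _, _ => -1
  | fuel + 1, heap, visit =>
    match pvPopMin heap with
    | none => -1
    | some ((negd, r, c), rest) =>
      let dist := -negd
      if r == n - 1 && c == n - 1 then dist
      else
        let st := (pvNbrs4 r c).foldl (fun (st : List (Int × Int × Int) × PySem.Set (Int × Int)) p =>
          if pvValid n p.1 p.2 && !(PySem.Set.contains st.2 p) then
            (st.1 ++ [(-(min dist (md.getD p 0)), p.1, p.2)], PySem.Set.add st.2 p)
          else st) (rest, visit)
        pvDijkstra n md fuel st.1 st.2

def maximumSafenesFactor (grid : List (List Int)) : Int :=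
  let n : Int := grid.length
  let md := pvMinDist grid n
  pvDijkstra n md (2 * n.toNat * n.toNat + 2) [(-(md.getD (0, 0) 0), 0, 0)]
    (PySem.Set.add PySem.Set.empty (0, 0))

-- ===== PORT B =====
-- the stack loop of reachable(t): flood fill over the cells with min_dist >= t
def pvFlood (n : Int) (md : PySem.Dict (Int × Int) Int) (t : Int) : Nat → List (Int × Int) → PySem.Set (Int × Int) → PySem.Set (Int × Int)
  | 0, _, seen => seen
  | fuel + 1, stack, seen =>
    match PySem.List.pop? stack (-1) with
    | none => seen
    | some ((r, c), rest) =>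
      let st := (pvNbrs4 r c).foldl (fun (st : List (Int × Int) × PySem.Set (Int × Int)) p =>
        if pvValid n p.1 p.2 && !(PySem.Set.contains st.2 p) && decide (t ≤ md.getD p 0) then
          (st.1 ++ [p], PySem.Set.add st.2 p)
        else st) (rest, seen)
      pvFlood n md t fuel st.1 st.2

-- reachable(t)
def pvReachable (n : Int) (md : PySem.Dict (Int × Int) Int) (t : Int) : Bool :=
  if md.getD (0, 0) 0 < t then false
  else
    let seen := pvFlood n md t (2 * n.toNat * n.toNat + 2) [(0, 0)] (PySem.Set.add PySem.Set.empty (0, 0))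
    PySem.Set.contains seen (n - 1, n - 1)

-- the candidate thresholds {min_dist[(r,c)] for r,c} as a row-major value list
def pvVals (n : Int) (md : PySem.Dict (Int × Int) Int) : List Int :=
  (PySem.List.pyRange 0 n 1).flatMap (fun r =>
    (PySem.List.pyRange 0 n 1).map (fun c => md.getD (r, c) 0))

-- for t in sorted(..., reverse=True): if reachable(t): return t
def pvScan (n : Int) (md : PySem.Dict (Int × Int) Int) : List Int → Int
  | [] => -1
  | t :: ts => if pvReachable n md t then t else pvScan n md ts

def maximumSafenesFactor_alt (grid : List (List Int)) : Int :=
  let n : Int := grid.length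
  let md := pvMinDist grid n
  pvScan n md (PySem.List.sorted (PySem.Set.ofList (pvVals n md)) (fun x => x) true)

-- ===== PRECONDITION & SPEC =====
-- Pre_ excludes exactly the inputs on which A raises: the empty grid and grids with no
-- nonzero cell in the n x n region (KeyError on min_dist) and grids with a row shorter
-- than len(grid) (IndexError).
def Pre_maximumSafenesFactor (grid : List (List Int)) : Prop :=
  1 ≤ grid.length ∧ (∀ row ∈ grid, grid.length ≤ row.length) ∧
    ∃ row ∈ grid, ∃ x ∈ row.take grid.length, x ≠ 0
instance (grid : List (List Int)) : Decidable (Pre_maximumSafenesFactor grid) := by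
  unfold Pre_maximumSafenesFactor; infer_instance

def pvWitness_maximumSafenesFactor : List (List Int) := [[1, 0], [0, 0]]

def Spec_maximumSafenesFactor (grid : List (List Int)) (out : Int) : Prop := out = maximumSafenesFactor_alt grid
instance (grid : List (List Int)) (out : Int) : Decidable (Spec_maximumSafenesFactor grid out) := by
  unfold Spec_maximumSafenesFactor; infer_instance

-- ===== CLAIM (what is proved, stated in full; the proofs are below) =====
def Claim_equal_maximumSafenesFactor : Prop := ∀ (grid : List (List Int)), Dom_maximumSafenesFactor grid → Pre_maximumSafenesFactor grid → Spec_maximumSafenesFactor grid (maximumSafenesFactor grid)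

-- ===== LEMMAS AND PROOFS =====

-- abstract step relation: one move onto a valid neighbour cell of safeness value ≥ t
def pvStepR (n : Int) (w : Int × Int → Int) (t : Int) (p q : Int × Int) : Prop :=
  pvValid n q.1 q.2 = true ∧ q ∈ pvNbrs4 p.1 p.2 ∧ t ≤ w q

-- "z is joined to (0,0) by a path all of whose cells have value ≥ t"
def pvReachR (n : Int) (w : Int × Int → Int) (t : Int) (z : Int × Int) : Prop :=
  pvValid n 0 0 = true ∧ t ≤ w (0, 0) ∧ Relation.ReflTransGen (pvStepR n w t) (0, 0) z

def pvW (md : PySem.Dict (Int × Int) Int) : Int × Int → Int := fun p => md.getD p 0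

def pvCells (n : Int) : List (Int × Int) :=
  (PySem.List.pyRange 0 n 1).flatMap (fun r => (PySem.List.pyRange 0 n 1).map (fun c => (r, c)))

lemma pvPopMin_none (l : List (Int × Int × Int)) : pvPopMin l = none ↔ l = [] := by
  cases l with
  | nil => simp [pvPopMin]
  | cons x xs =>
    simp only [pvPopMin]
    cases h : pvPopMin xs with
    | none => simp
    | some p => obtain ⟨m, rest⟩ := p; simp only; split <;> simp

lemma pvPopMin_spec (l : List (Int × Int × Int)) (x : Int × Int × Int) (rest : List (Int × Int × Int))
    (h : pvPopMin l = some (x, rest)) : (x :: rest).Perm l ∧ ∀ y ∈ l, x.1 ≤ y.1 := by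
  induction l generalizing x rest with
  | nil => simp [pvPopMin] at h
  | cons a xs ih =>
    simp only [pvPopMin] at h
    cases h' : pvPopMin xs with
    | none =>
      have hxs := (pvPopMin_none xs).mp h'
      subst hxs
      simp only [pvPopMin] at h
      simp only [Option.some.injEq, Prod.mk.injEq] at h
      obtain ⟨rfl, rfl⟩ := h
      exact ⟨List.Perm.refl _, by simp⟩
    | some p =>
      obtain ⟨m, r⟩ := p
      obtain ⟨hperm, hmin⟩ := ih m r h'
      rw [h'] at h
      simp only at h
      by_cases hlt : pvTripLt m a = true
      · rw [if_pos hlt] at h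
        simp only [Option.some.injEq, Prod.mk.injEq] at h
        obtain ⟨rfl, rfl⟩ := h
        have hma : m.1 ≤ a.1 := by
          simp only [pvTripLt, Bool.or_eq_true, Bool.and_eq_true, beq_iff_eq,
            decide_eq_true_eq] at hlt
          rcases hlt with h1 | ⟨h1, _⟩ <;> omega
        constructor
        · exact ((List.Perm.swap a m r).trans (hperm.cons a)).symm.symm
        · intro y hy
          rcases List.mem_cons.mp hy with rfl | hy
          · exact hma
          · exact hmin y hy
      · rw [if_neg hlt] at h
        simp only [Option.some.injEq, Prod.mk.injEq] at h
        obtain ⟨rfl, rfl⟩ := h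
        have ham : a.1 ≤ m.1 := by
          by_contra hc
          apply hlt
          simp only [pvTripLt, Bool.or_eq_true, Bool.and_eq_true, beq_iff_eq,
            decide_eq_true_eq]
          left
          omega
        refine ⟨List.Perm.refl _, ?_⟩
        intro y hy
        rcases List.mem_cons.mp hy with rfl | hy
        · exact le_refl _
        · exact le_trans ham (hmin y hy)

lemma pvReachR_mono (n : Int) (w : Int × Int → Int) (t t' : Int) (z : Int × Int)
    (hle : t' ≤ t) (h : pvReachR n w t z) : pvReachR n w t' z := by
  obtain ⟨h1, h2, h3⟩ := h
  exact ⟨h1, le_trans hle h2,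
    h3.mono (fun a b hab => ⟨hab.1, hab.2.1, le_trans hle hab.2.2⟩)⟩

lemma pvReachR_le_w (n : Int) (w : Int × Int → Int) (t : Int) (z : Int × Int)
    (h : pvReachR n w t z) : t ≤ w z := by
  obtain ⟨h1, h2, h3⟩ := h
  rcases Relation.ReflTransGen.cases_tail h3 with heq | ⟨c, _, hc⟩
  · rw [heq]; exact h2
  · exact hc.2.2

lemma pvReachR_valid (n : Int) (w : Int × Int → Int) (t : Int) (z : Int × Int)
    (h : pvReachR n w t z) : pvValid n z.1 z.2 = true := by
  obtain ⟨h1, h2, h3⟩ := h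
  rcases Relation.ReflTransGen.cases_tail h3 with heq | ⟨c, _, hc⟩
  · rw [heq]; exact h1
  · exact hc.1

lemma pvLB_exists (l : List Int) : ∃ m, ∀ x ∈ l, m ≤ x := by
  induction l with
  | nil => exact ⟨0, by simp⟩
  | cons x xs ih =>
    obtain ⟨m, hm⟩ := ih
    refine ⟨min m x, ?_⟩
    intro y hy
    rcases List.mem_cons.mp hy with rfl | hy
    · exact min_le_right _ _
    · exact le_trans (min_le_left _ _) (hm y hy)

lemma pvMem_cells (n : Int) (p : Int × Int) : p ∈ pvCells n ↔ pvValid n p.1 p.2 = true := by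
  obtain ⟨p1, p2⟩ := p
  simp only [pvCells, List.mem_flatMap, List.mem_map, PySem.List.mem_pyRange_one, pvValid,
    Bool.and_eq_true, decide_eq_true_eq]
  constructor
  · rintro ⟨r, hr, c, hc, heq⟩
    rw [Prod.mk.injEq] at heq
    obtain ⟨rfl, rfl⟩ := heq
    omega
  · rintro ⟨⟨⟨h1, h2⟩, h3⟩, h4⟩
    exact ⟨p1, ⟨h1, h2⟩, p2, ⟨h3, h4⟩, rfl⟩

lemma pvLength_cells (n : Int) : (pvCells n).length = n.toNat * n.toNat := by
  simp only [pvCells, List.length_flatMap]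
  have : (List.map (fun a => (List.map (fun c => ((a, c) : Int × Int)) (PySem.List.pyRange 0 n)).length) (PySem.List.pyRange 0 n)) =
      (PySem.List.pyRange 0 n).map (fun _ => n.toNat) := by
    apply List.map_congr_left
    intro r _
    simp [PySem.List.length_pyRange_one]
  rw [this, PySem.List.sum_map_const_nat, PySem.List.length_pyRange_one]
  simp

lemma pvVals_eq (n : Int) (md : PySem.Dict (Int × Int) Int) : pvVals n md = (pvCells n).map (pvW md) := by
  simp only [pvVals, pvCells, List.map_flatMap, List.map_map]
  refine congrArg (fun f => List.flatMap f (PySem.List.pyRange 0 n)) ?_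
  funext r
  apply List.map_congr_left
  intro c _
  rfl

lemma pvSize_bound (n : Int) (S : List (Int × Int)) (hnd : S.Nodup)
    (hv : ∀ p ∈ S, pvValid n p.1 p.2 = true) : S.length ≤ n.toNat * n.toNat := by
  have hsub : S ⊆ pvCells n := fun p hp => (pvMem_cells n p).mpr (hv p hp)
  have := (List.subperm_of_subset hnd hsub).length_le
  rwa [pvLength_cells] at this

-- any two corner cells are joined when t is below every cell value
lemma pvConn (n : Int) (w : Int × Int → Int) (t : Int) (hn : 1 ≤ n)
    (hw : ∀ p, pvValid n p.1 p.2 = true → t ≤ w p) :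
    Relation.ReflTransGen (pvStepR n w t) (0, 0) (n - 1, n - 1) := by
  have hcol : ∀ k : Nat, (k : Int) < n → Relation.ReflTransGen (pvStepR n w t) (0, 0) ((k : Int), 0) := by
    intro k
    induction k with
    | zero => intro _; exact Relation.ReflTransGen.refl
    | succ k ih =>
      intro hk
      have hk' : (k : Int) < n := by push_cast at hk ⊢; omega
      refine Relation.ReflTransGen.tail (ih hk') ?_
      have hval : pvValid n ((k : Int) + 1) 0 = true := by
        simp only [pvValid, Bool.and_eq_true, decide_eq_true_eq]
        push_cast at hk
        omega
      refine ⟨?_, ?_, ?_⟩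
      · show pvValid n ((k + 1 : Nat) : Int) 0 = true
        push_cast
        exact hval
      · simp only [pvNbrs4, List.mem_cons]
        left
        push_cast
        rfl
      · have := hw ((k + 1 : Nat), 0) (by push_cast; exact hval)
        exact this
  have hcell : ∀ (a b : Nat), (a : Int) < n → (b : Int) < n →
      Relation.ReflTransGen (pvStepR n w t) (0, 0) ((a : Int), (b : Int)) := by
    intro a b ha
    induction b with
    | zero => intro _; exact hcol a ha
    | succ b ih =>
      intro hb
      have hb' : (b : Int) < n := by push_cast at hb ⊢; omega
      refine Relation.ReflTransGen.tail (ih hb') ?_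
      have hval : pvValid n (a : Int) ((b : Int) + 1) = true := by
        simp only [pvValid, Bool.and_eq_true, decide_eq_true_eq]
        push_cast at hb
        omega
      refine ⟨?_, ?_, ?_⟩
      · show pvValid n (a : Int) ((b + 1 : Nat) : Int) = true
        push_cast
        exact hval
      · simp only [pvNbrs4, List.mem_cons]
        right; right; left
        push_cast
        rfl
      · have := hw ((a : Int), ((b + 1 : Nat) : Int)) (by push_cast; exact hval)
        push_cast at this ⊢
        exact this
  have h1 : n - 1 = (((n - 1).toNat : Nat) : Int) := by omega
  have h2 : (((n - 1).toNat : Nat) : Int) < n := by omega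
  rw [h1]
  exact hcell _ _ h2 h2

lemma pvFlood_fold (n : Int) (md : PySem.Dict (Int × Int) Int) (t : Int) (x : Int × Int)
    (seen0 : PySem.Set (Int × Int)) (k0 : Nat)
    (hx : pvReachR n (pvW md) t x) :
    ∀ (l : List (Int × Int)), (∀ p ∈ l, p ∈ pvNbrs4 x.1 x.2) →
    ∀ st : List (Int × Int) × PySem.Set (Int × Int),
    (∀ p ∈ st.1, p ∈ st.2) → st.2.Nodup → (∀ p ∈ st.2, pvReachR n (pvW md) t p) →
    (∀ p ∈ st.2, p ∈ seen0 ∨ p ∈ st.1) →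
    st.1.length + seen0.length = k0 + st.2.length →
    seen0 ⊆ st.2 →
    ((∀ p ∈ (l.foldl (fun (st : List (Int × Int) × PySem.Set (Int × Int)) p =>
        if pvValid n p.1 p.2 && !(PySem.Set.contains st.2 p) && decide (t ≤ md.getD p 0) then
          (st.1 ++ [p], PySem.Set.add st.2 p)
        else st) st).1, p ∈ (l.foldl (fun (st : List (Int × Int) × PySem.Set (Int × Int)) p =>
        if pvValid n p.1 p.2 && !(PySem.Set.contains st.2 p) && decide (t ≤ md.getD p 0) then
          (st.1 ++ [p], PySem.Set.add st.2 p)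
        else st) st).2) ∧ (l.foldl (fun (st : List (Int × Int) × PySem.Set (Int × Int)) p =>
        if pvValid n p.1 p.2 && !(PySem.Set.contains st.2 p) && decide (t ≤ md.getD p 0) then
          (st.1 ++ [p], PySem.Set.add st.2 p)
        else st) st).2.Nodup ∧ (∀ p ∈ (l.foldl (fun (st : List (Int × Int) × PySem.Set (Int × Int)) p =>
        if pvValid n p.1 p.2 && !(PySem.Set.contains st.2 p) && decide (t ≤ md.getD p 0) then
          (st.1 ++ [p], PySem.Set.add st.2 p)
        else st) st).2, pvReachR n (pvW md) t p) ∧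
     (∀ p ∈ (l.foldl (fun (st : List (Int × Int) × PySem.Set (Int × Int)) p =>
        if pvValid n p.1 p.2 && !(PySem.Set.contains st.2 p) && decide (t ≤ md.getD p 0) then
          (st.1 ++ [p], PySem.Set.add st.2 p)
        else st) st).2, p ∈ seen0 ∨ p ∈ (l.foldl (fun (st : List (Int × Int) × PySem.Set (Int × Int)) p =>
        if pvValid n p.1 p.2 && !(PySem.Set.contains st.2 p) && decide (t ≤ md.getD p 0) then
          (st.1 ++ [p], PySem.Set.add st.2 p)
        else st) st).1) ∧
     (l.foldl (fun (st : List (Int × Int) × PySem.Set (Int × Int)) p =>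
        if pvValid n p.1 p.2 && !(PySem.Set.contains st.2 p) && decide (t ≤ md.getD p 0) then
          (st.1 ++ [p], PySem.Set.add st.2 p)
        else st) st).1.length + seen0.length = k0 + (l.foldl (fun (st : List (Int × Int) × PySem.Set (Int × Int)) p =>
        if pvValid n p.1 p.2 && !(PySem.Set.contains st.2 p) && decide (t ≤ md.getD p 0) then
          (st.1 ++ [p], PySem.Set.add st.2 p)
        else st) st).2.length ∧
     seen0 ⊆ (l.foldl (fun (st : List (Int × Int) × PySem.Set (Int × Int)) p =>
        if pvValid n p.1 p.2 && !(PySem.Set.contains st.2 p) && decide (t ≤ md.getD p 0) then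
          (st.1 ++ [p], PySem.Set.add st.2 p)
        else st) st).2 ∧ st.2 ⊆ (l.foldl (fun (st : List (Int × Int) × PySem.Set (Int × Int)) p =>
        if pvValid n p.1 p.2 && !(PySem.Set.contains st.2 p) && decide (t ≤ md.getD p 0) then
          (st.1 ++ [p], PySem.Set.add st.2 p)
        else st) st).2 ∧
     (∃ ext, (l.foldl (fun (st : List (Int × Int) × PySem.Set (Int × Int)) p =>
        if pvValid n p.1 p.2 && !(PySem.Set.contains st.2 p) && decide (t ≤ md.getD p 0) then
          (st.1 ++ [p], PySem.Set.add st.2 p)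
        else st) st).1 = st.1 ++ ext) ∧
     (∀ q ∈ l, pvValid n q.1 q.2 = true → t ≤ md.getD q 0 → q ∈ (l.foldl (fun (st : List (Int × Int) × PySem.Set (Int × Int)) p =>
        if pvValid n p.1 p.2 && !(PySem.Set.contains st.2 p) && decide (t ≤ md.getD p 0) then
          (st.1 ++ [p], PySem.Set.add st.2 p)
        else st) st).2)) := by
  intro l
  induction l with
  | nil =>
    intro _ st h1 h2 h3 h4 h5 h6
    simp only [List.foldl_nil]
    exact ⟨h1, h2, h3, h4, h5, h6, fun _ h => h, ⟨[], by simp⟩, by simp⟩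
  | cons q l' ih =>
    intro hl st h1 h2 h3 h4 h5 h6
    simp only [List.foldl_cons]
    by_cases hg : (pvValid n q.1 q.2 && !(PySem.Set.contains st.2 q) && decide (t ≤ md.getD q 0)) = true
    · rw [if_pos hg]
      simp only [Bool.and_eq_true, Bool.not_eq_true', decide_eq_true_eq] at hg
      obtain ⟨⟨hval, hcont⟩, hwq⟩ := hg
      have hqnot : q ∉ st.2 := by
        intro hmem
        rw [← PySem.Set.contains_iff] at hmem
        rw [hcont] at hmem
        exact Bool.false_ne_true hmem
      have hreachq : pvReachR n (pvW md) t q :=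
        ⟨hx.1, hx.2.1, hx.2.2.tail ⟨hval, hl q (List.mem_cons_self ..), hwq⟩⟩
      have hadd : PySem.Set.add st.2 q = st.2 ++ [q] := by
        simp [PySem.Set.add, hqnot]
      have hres := ih (fun p hp => hl p (List.mem_cons_of_mem _ hp))
        (st.1 ++ [q], PySem.Set.add st.2 q)
        (by
          intro p hp
          rcases List.mem_append.mp hp with hp | hp
          · exact (PySem.Set.mem_add st.2 q p).mpr (Or.inl (h1 p hp))
          · simp only [List.mem_singleton] at hp
            exact (PySem.Set.mem_add st.2 q p).mpr (Or.inr hp))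
        (PySem.Set.nodup_add st.2 q h2)
        (by
          intro p hp
          rcases (PySem.Set.mem_add st.2 q p).mp hp with hp | rfl
          · exact h3 p hp
          · exact hreachq)
        (by
          intro p hp
          rcases (PySem.Set.mem_add st.2 q p).mp hp with hp | rfl
          · rcases h4 p hp with h | h
            · exact Or.inl h
            · exact Or.inr (List.mem_append.mpr (Or.inl h))
          · exact Or.inr (List.mem_append.mpr (Or.inr (List.mem_singleton.mpr rfl))))
        (by
          simp only [List.length_append, List.length_singleton, hadd]
          omega)
        (fun p hp => (PySem.Set.mem_add st.2 q p).mpr (Or.inl (h6 hp)))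
      obtain ⟨c1, c2, c3, c4, c5, c6, c7, ⟨ext, hext⟩, c8⟩ := hres
      refine ⟨c1, c2, c3, c4, c5, c6, ?_, ⟨[q] ++ ext, by rw [hext]; simp⟩, ?_⟩
      · intro p hp
        exact c7 ((PySem.Set.mem_add st.2 q p).mpr (Or.inl hp))
      · intro q' hq' hv' hw'
        rcases List.mem_cons.mp hq' with rfl | hq'
        · exact c7 ((PySem.Set.mem_add st.2 q' q').mpr (Or.inr rfl))
        · exact c8 q' hq' hv' hw'
    · rw [if_neg hg]
      have hres := ih (fun p hp => hl p (List.mem_cons_of_mem _ hp)) st h1 h2 h3 h4 h5 h6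
      obtain ⟨c1, c2, c3, c4, c5, c6, c7, hext, c8⟩ := hres
      refine ⟨c1, c2, c3, c4, c5, c6, c7, hext, ?_⟩
      intro q' hq' hv' hw'
      rcases List.mem_cons.mp hq' with rfl | hq'
      · -- guard failed though valid and value ok: q' was already in st.2
        have : PySem.Set.contains st.2 q' = true := by
          by_contra hc
          apply hg
          simp only [Bool.and_eq_true, Bool.not_eq_true', decide_eq_true_eq]
          exact ⟨⟨hv', Bool.eq_false_iff.mpr hc⟩, hw'⟩
        exact c7 ((PySem.Set.contains_iff st.2 q').mp this)
      · exact c8 q' hq' hv' hw'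

lemma pvFlood_main (n : Int) (md : PySem.Dict (Int × Int) Int) (t : Int) :
    ∀ (fuel : Nat) (stack : List (Int × Int)) (seen : PySem.Set (Int × Int)),
    (∀ p ∈ stack, p ∈ seen) → seen.Nodup → (∀ p ∈ seen, pvReachR n (pvW md) t p) →
    (∀ p ∈ seen, p ∉ stack → ∀ q, pvStepR n (pvW md) t p q → q ∈ seen) →
    stack.length + 2 * (n.toNat * n.toNat - seen.length) + 1 ≤ fuel →
    (∀ p ∈ seen, p ∈ pvFlood n md t fuel stack seen) ∧
    (∀ p ∈ pvFlood n md t fuel stack seen, pvReachR n (pvW md) t p) ∧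
    (∀ p ∈ pvFlood n md t fuel stack seen, ∀ q, pvStepR n (pvW md) t p q →
      q ∈ pvFlood n md t fuel stack seen) := by
  intro fuel
  induction fuel with
  | zero => intro stack seen _ _ _ _ hf; omega
  | succ fuel ih =>
    intro stack seen h1 h2 h3 h4 hf
    rcases List.eq_nil_or_concat stack with rfl | ⟨ys, x, hconcat⟩
    · simp only [pvFlood]
      exact ⟨fun p hp => hp, h3, fun p hp q hq => h4 p hp (by simp) q hq⟩
    · rw [List.concat_eq_append] at hconcat
      subst hconcat
      have hpop : PySem.List.pop? (ys ++ [x]) (-1) = some (x, ys) := PySem.List.pop?_last ys x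
      simp only [pvFlood, hpop]
      obtain ⟨x1, x2⟩ := x
      have hxseen : (x1, x2) ∈ seen := h1 _ (by simp)
      have hfold := pvFlood_fold n md t (x1, x2) seen ys.length (h3 _ hxseen)
        (pvNbrs4 x1 x2) (fun p hp => hp) (ys, seen)
        (fun p hp => h1 p (List.mem_append.mpr (Or.inl hp))) h2 h3
        (fun p hp => Or.inl hp) rfl (fun p hp => hp)
      obtain ⟨c1, c2, c3, c4, c5, c6, c7, ⟨ext, hext⟩, c8⟩ := hfold
      set st := (pvNbrs4 x1 x2).foldl (fun (st : List (Int × Int) × PySem.Set (Int × Int)) p =>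
        if pvValid n p.1 p.2 && !(PySem.Set.contains st.2 p) && decide (t ≤ md.getD p 0) then
          (st.1 ++ [p], PySem.Set.add st.2 p)
        else st) (ys, seen) with hst
      have hst2valid : ∀ p ∈ st.2, pvValid n p.1 p.2 = true :=
        fun p hp => pvReachR_valid n (pvW md) t p (c3 p hp)
      have hst2le : st.2.length ≤ n.toNat * n.toNat := pvSize_bound n st.2 c2 hst2valid
      have hseenle : seen.length ≤ st.2.length :=
        (List.subperm_of_subset h2 c7).length_le
      have hih := ih st.1 st.2 c1 c2 c3
        (by
          intro p hp hpstack q hq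
          rcases c4 p hp with hpseen | hpst1
          · by_cases hpys : p ∈ ys
            · exact absurd (hext ▸ List.mem_append.mpr (Or.inl hpys)) hpstack
            · by_cases hpx : p = (x1, x2)
              · subst hpx
                exact c8 q hq.2.1 hq.1 hq.2.2
              · have : p ∉ ys ++ [(x1, x2)] := by
                  intro hc
                  rcases List.mem_append.mp hc with hc | hc
                  · exact hpys hc
                  · exact hpx (List.mem_singleton.mp hc)
                exact c7 (h4 p hpseen this q hq)
          · exact absurd hpst1 hpstack)
        (by
          have hlen : st.1.length + seen.length = ys.length + st.2.length := c5
          have hflen : (ys ++ [(x1, x2)]).length + 2 * (n.toNat * n.toNat - seen.length) + 1 ≤ fuel + 1 := hf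
          simp only [List.length_append, List.length_singleton] at hflen
          omega)
      obtain ⟨d1, d2, d3⟩ := hih
      exact ⟨fun p hp => d1 p (c6 hp), d2, d3⟩

lemma pvReachable_iff (n : Int) (md : PySem.Dict (Int × Int) Int) (t : Int) (hn : 1 ≤ n) :
    pvReachable n md t = true ↔ pvReachR n (pvW md) t (n - 1, n - 1) := by
  unfold pvReachable
  by_cases hlt : md.getD (0, 0) 0 < t
  · rw [if_pos hlt]
    constructor
    · intro h; exact absurd h (by simp)
    · intro h
      have : t ≤ md.getD (0, 0) 0 := h.2.1
      omega
  · rw [if_neg hlt]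
    have hts : t ≤ md.getD (0, 0) 0 := not_lt.mp hlt
    have hvs : pvValid n 0 0 = true := by
      simp only [pvValid, Bool.and_eq_true, decide_eq_true_eq]
      omega
    have hadd : PySem.Set.add (PySem.Set.empty) ((0 : Int), (0 : Int)) = [((0 : Int), (0 : Int))] := rfl
    have hsq : 1 ≤ n.toNat * n.toNat := by
      have hm : 1 ≤ n.toNat := by omega
      exact Nat.mul_le_mul hm hm
    have hmain := pvFlood_main n md t (2 * n.toNat * n.toNat + 2) [((0 : Int), (0 : Int))]
      (PySem.Set.add PySem.Set.empty ((0 : Int), (0 : Int)))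
      (by rw [hadd]; intro p hp; exact hp)
      (by rw [hadd]; simp)
      (by
        rw [hadd]
        intro p hp
        rw [List.mem_singleton.mp hp]
        exact ⟨hvs, hts, Relation.ReflTransGen.refl⟩)
      (by
        rw [hadd]
        intro p hp hnp
        exact absurd hp hnp)
      (by
        rw [hadd]
        simp only [List.length_singleton]
        have hmul : 2 * n.toNat * n.toNat = 2 * (n.toNat * n.toNat) := by ring
        omega)
    obtain ⟨d1, d2, d3⟩ := hmain
    rw [PySem.Set.contains_iff]
    constructor
    · intro h
      exact d2 _ h
    · rintro ⟨_, _, hrtg⟩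
      have hmem : ∀ z, Relation.ReflTransGen (pvStepR n (pvW md) t) (0, 0) z →
          z ∈ pvFlood n md t (2 * n.toNat * n.toNat + 2) [((0 : Int), (0 : Int))]
            (PySem.Set.add PySem.Set.empty ((0 : Int), (0 : Int))) := by
        intro z hz
        induction hz with
        | refl => exact d1 _ (by rw [hadd]; simp)
        | tail hsub hstep ih => exact d3 _ ih _ hstep
      exact hmem _ hrtg

-- one relaxation step of the Dijkstra loop body (the foldl function with dist := k)
def pvDStep (n : Int) (md : PySem.Dict (Int × Int) Int) (k : Int)
    (st : List (Int × Int × Int) × PySem.Set (Int × Int)) (p : Int × Int) :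
    List (Int × Int × Int) × PySem.Set (Int × Int) :=
  if pvValid n p.1 p.2 && !(PySem.Set.contains st.2 p) then
    (st.1 ++ [(-(min k (md.getD p 0)), p.1, p.2)], PySem.Set.add st.2 p)
  else st

def pvDFold (n : Int) (md : PySem.Dict (Int × Int) Int) (k : Int) (rest0 : List (Int × Int × Int))
    (visit0 : PySem.Set (Int × Int)) (st : List (Int × Int × Int) × PySem.Set (Int × Int)) : Prop :=
  (∀ y ∈ st.1, y.2 ∈ st.2 ∧ pvReachR n (pvW md) (-y.1) y.2 ∧ -y.1 ≤ k ∧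
      min k (pvW md y.2) ≤ -y.1 ∧ ∃ z, pvValid n z.1 z.2 = true ∧ -y.1 = pvW md z) ∧
  (st.2.Nodup ∧ ∀ p ∈ st.2, pvValid n p.1 p.2 = true) ∧
  (st.1.map (·.2)).Nodup ∧
  st.1.length + visit0.length = rest0.length + st.2.length ∧
  visit0 ⊆ st.2 ∧
  (∃ extra, st.1 = rest0 ++ extra ∧ ∀ y ∈ extra, y.2 ∉ visit0) ∧
  (∀ p ∈ st.2, p ∈ visit0 ∨ p ∈ st.1.map (·.2))

lemma pvDFold_step (n : Int) (md : PySem.Dict (Int × Int) Int) (k : Int) (xc : Int × Int)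
    (rest0 : List (Int × Int × Int)) (visit0 : PySem.Set (Int × Int))
    (hreachx : pvReachR n (pvW md) k xc)
    (hkz : ∃ z, pvValid n z.1 z.2 = true ∧ k = pvW md z) :
    ∀ (l : List (Int × Int)), (∀ p ∈ l, p ∈ pvNbrs4 xc.1 xc.2) →
    ∀ st, pvDFold n md k rest0 visit0 st →
    pvDFold n md k rest0 visit0 (l.foldl (pvDStep n md k) st) ∧
    st.2 ⊆ (l.foldl (pvDStep n md k) st).2 ∧
    (∀ q ∈ l, pvValid n q.1 q.2 = true → q ∈ (l.foldl (pvDStep n md k) st).2) := by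
  intro l
  induction l with
  | nil =>
    intro _ st h
    exact ⟨h, fun _ hp => hp, by simp⟩
  | cons q l' ih =>
    intro hl st hFI
    obtain ⟨i1, ⟨i2a, i2b⟩, i3, i4, i5, ⟨extra, hex, hexv⟩, i7⟩ := hFI
    simp only [List.foldl_cons]
    by_cases hg : (pvValid n q.1 q.2 && !(PySem.Set.contains st.2 q)) = true
    · have hstep : pvDStep n md k st q =
          (st.1 ++ [(-(min k (md.getD q 0)), q.1, q.2)], PySem.Set.add st.2 q) := by
        rw [pvDStep, if_pos hg]
      simp only [Bool.and_eq_true, Bool.not_eq_true'] at hg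
      obtain ⟨hval, hcont⟩ := hg
      have hqnot : q ∉ st.2 := by
        intro hmem
        rw [← PySem.Set.contains_iff] at hmem
        rw [hcont] at hmem
        exact Bool.false_ne_true hmem
      have hwq : pvW md q = md.getD q 0 := rfl
      have hreachq : pvReachR n (pvW md) (min k (md.getD q 0)) q := by
        have hx' := pvReachR_mono n (pvW md) k (min k (md.getD q 0)) xc (min_le_left _ _) hreachx
        exact ⟨hx'.1, hx'.2.1, hx'.2.2.tail ⟨hval, hl q (List.mem_cons_self ..), by
          rw [hwq]; exact min_le_right _ _⟩⟩
      have hadd : PySem.Set.add st.2 q = st.2 ++ [q] := by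
        simp [PySem.Set.add, hqnot]
      have hFI' : pvDFold n md k rest0 visit0
          (st.1 ++ [(-(min k (md.getD q 0)), q.1, q.2)], PySem.Set.add st.2 q) := by
        refine ⟨?_, ⟨PySem.Set.nodup_add st.2 q i2a, ?_⟩, ?_, ?_, ?_, ?_, ?_⟩
        · intro y hy
          rcases List.mem_append.mp hy with hy | hy
          · obtain ⟨j1, j2, j3, j4, j5⟩ := i1 y hy
            exact ⟨(PySem.Set.mem_add st.2 q y.2).mpr (Or.inl j1), j2, j3, j4, j5⟩
          · simp only [List.mem_singleton] at hy
            subst hy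
            simp only [neg_neg]
            refine ⟨(PySem.Set.mem_add st.2 q (q.1, q.2)).mpr (Or.inr (Prod.mk.eta)), ?_, min_le_left _ _, ?_, ?_⟩
            · rw [Prod.mk.eta]; exact hreachq
            · rw [Prod.mk.eta, hwq]
            · rcases min_choice k (md.getD q 0) with hmc | hmc
              · obtain ⟨z, hz1, hz2⟩ := hkz
                exact ⟨z, hz1, by rw [hmc, hz2]⟩
              · exact ⟨q, hval, by rw [hmc, hwq]⟩
        · intro p hp
          rcases (PySem.Set.mem_add st.2 q p).mp hp with hp | rfl
          · exact i2b p hp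
          · exact hval
        · rw [List.map_append]
          simp only [List.map_cons, List.map_nil]
          have hqn : q ∉ st.1.map (·.2) := by
            intro hc
            obtain ⟨y, hy, hyq⟩ := List.mem_map.mp hc
            exact hqnot (hyq ▸ (i1 y hy).1)
          rw [List.nodup_append]
          refine ⟨i3, List.nodup_singleton _, ?_⟩
          intro a ha b hb
          rw [List.mem_singleton] at hb
          subst hb
          simp only [Prod.mk.eta]
          intro heq
          subst heq
          exact hqn ha
        · rw [hadd]
          simp only [List.length_append, List.length_singleton]
          omega
        · intro p hp
          exact (PySem.Set.mem_add st.2 q p).mpr (Or.inl (i5 hp))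
        · refine ⟨extra ++ [(-(min k (md.getD q 0)), q.1, q.2)], by rw [hex]; simp, ?_⟩
          intro y hy
          rcases List.mem_append.mp hy with hy | hy
          · exact hexv y hy
          · simp only [List.mem_singleton] at hy
            subst hy
            simp only [Prod.mk.eta]
            intro hc
            exact hqnot (i5 hc)
        · intro p hp
          rcases (PySem.Set.mem_add st.2 q p).mp hp with hp | rfl
          · rcases i7 p hp with h | h
            · exact Or.inl h
            · exact Or.inr (by rw [List.map_append]; exact List.mem_append.mpr (Or.inl h))
          · refine Or.inr ?_
            rw [List.map_append]
            refine List.mem_append.mpr (Or.inr ?_)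
            simp [Prod.mk.eta]
      rw [hstep]
      have hres := ih (fun p hp => hl p (List.mem_cons_of_mem _ hp)) _ hFI'
      obtain ⟨d1, d2, d3⟩ := hres
      refine ⟨d1, ?_, ?_⟩
      · intro p hp
        exact d2 ((PySem.Set.mem_add st.2 q p).mpr (Or.inl hp))
      · intro q' hq' hv'
        rcases List.mem_cons.mp hq' with rfl | hq'
        · exact d2 ((PySem.Set.mem_add st.2 q' q').mpr (Or.inr rfl))
        · exact d3 q' hq' hv'
    · have hstep : pvDStep n md k st q = st := by
        rw [pvDStep, if_neg hg]
      rw [hstep]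
      have hres := ih (fun p hp => hl p (List.mem_cons_of_mem _ hp)) st
        ⟨i1, ⟨i2a, i2b⟩, i3, i4, i5, ⟨extra, hex, hexv⟩, i7⟩
      obtain ⟨d1, d2, d3⟩ := hres
      refine ⟨d1, d2, ?_⟩
      intro q' hq' hv'
      rcases List.mem_cons.mp hq' with rfl | hq'
      · have : PySem.Set.contains st.2 q' = true := by
          by_contra hc
          apply hg
          simp only [Bool.and_eq_true, Bool.not_eq_true']
          exact ⟨hv', Bool.eq_false_iff.mpr hc⟩
        exact d2 ((PySem.Set.contains_iff st.2 q').mp this)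
      · exact d3 q' hq' hv'

lemma pvWalk (n : Int) (md : PySem.Dict (Int × Int) Int) (t k : Int)
    (heap' : List (Int × Int × Int)) (visit' : PySem.Set (Int × Int))
    (hkt : t ≤ k)
    (hclo : ∀ p ∈ visit', p ∉ heap'.map (·.2) → ∀ q, pvValid n q.1 q.2 = true →
      q ∈ pvNbrs4 p.1 p.2 → q ∈ visit')
    (hkey : ∀ y ∈ heap', min k (pvW md y.2) ≤ -y.1) :
    ∀ p z, Relation.ReflTransGen (pvStepR n (pvW md) t) p z →
    p ∈ visit' → pvReachR n (pvW md) t p → t ≤ pvW md p →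
    (z ∉ visit' ∨ z ∈ heap'.map (·.2)) →
    ∃ y ∈ heap', t ≤ -y.1 ∧ pvReachR n (pvW md) t y.2 ∧
      Relation.ReflTransGen (pvStepR n (pvW md) t) y.2 z := by
  intro p z hpath
  induction hpath using Relation.ReflTransGen.head_induction_on with
  | refl =>
    intro hz hrz hwz hcond
    rcases hcond with hcond | hcond
    · exact absurd hz hcond
    · obtain ⟨y, hy, hyz⟩ := List.mem_map.mp hcond
      refine ⟨y, hy, ?_, ?_, ?_⟩
      · have := hkey y hy
        rw [hyz] at this
        have h1 : t ≤ min k (pvW md z) := le_min hkt hwz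
        omega
      · rw [hyz]; exact hrz
      · rw [hyz]
  | head h' hrest ih =>
    intro ha hra hwa hcond
    rename_i a c
    by_cases hahc : a ∈ heap'.map (·.2)
    · obtain ⟨y, hy, hya⟩ := List.mem_map.mp hahc
      refine ⟨y, hy, ?_, ?_, ?_⟩
      · have := hkey y hy
        rw [hya] at this
        have h1 : t ≤ min k (pvW md a) := le_min hkt hwa
        omega
      · rw [hya]; exact hra
      · rw [hya]; exact Relation.ReflTransGen.head h' hrest
    · have hc : c ∈ visit' := hclo a ha hahc c h'.1 h'.2.1
      have hrc : pvReachR n (pvW md) t c := ⟨hra.1, hra.2.1, hra.2.2.tail h'⟩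
      exact ih hc hrc h'.2.2 hcond

def pvDInv (n : Int) (md : PySem.Dict (Int × Int) Int) (L : Int)
    (heap : List (Int × Int × Int)) (visit : PySem.Set (Int × Int)) : Prop :=
  (∀ y ∈ heap, y.2 ∈ visit ∧ pvReachR n (pvW md) (-y.1) y.2 ∧ -y.1 ≤ L ∧
      min L (pvW md y.2) ≤ -y.1 ∧ ∃ z, pvValid n z.1 z.2 = true ∧ -y.1 = pvW md z) ∧
  (visit.Nodup ∧ ∀ p ∈ visit, pvValid n p.1 p.2 = true) ∧
  (heap.map (·.2)).Nodup ∧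
  (∀ p ∈ visit, p ∉ heap.map (·.2) → ∀ q, pvValid n q.1 q.2 = true → q ∈ pvNbrs4 p.1 p.2 → q ∈ visit) ∧
  (((n - 1 : Int), (n - 1 : Int)) ∈ visit → ((n - 1 : Int), (n - 1 : Int)) ∈ heap.map (·.2)) ∧
  (∀ t z, pvReachR n (pvW md) t z → (z ∉ visit ∨ z ∈ heap.map (·.2)) →
    ∃ y ∈ heap, t ≤ -y.1 ∧ pvReachR n (pvW md) t y.2 ∧
      Relation.ReflTransGen (pvStepR n (pvW md) t) y.2 z) ∧
  (heap.map (·.2)) ⊆ visit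

lemma pvDijkstra_main (n : Int) (md : PySem.Dict (Int × Int) Int) (hn : 1 ≤ n) :
    ∀ (fuel : Nat) (L : Int) (heap : List (Int × Int × Int)) (visit : PySem.Set (Int × Int)),
    pvDInv n md L heap visit →
    heap.length + 2 * (n.toNat * n.toNat - visit.length) + 1 ≤ fuel →
    pvReachR n (pvW md) (pvDijkstra n md fuel heap visit) (n - 1, n - 1) ∧
    (∀ t, pvReachR n (pvW md) t (n - 1, n - 1) → t ≤ pvDijkstra n md fuel heap visit) ∧
    (∃ z, pvValid n z.1 z.2 = true ∧ pvDijkstra n md fuel heap visit = pvW md z) := by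
  intro fuel
  induction fuel with
  | zero => intro L heap visit hinv hf; omega
  | succ fuel ih =>
    intro L heap visit hinv hf
    obtain ⟨hi1, ⟨hvnd, hvval⟩, hh2, hpc, hee, hcut, hhsub⟩ := hinv
    have hvs : pvValid n 0 0 = true := by
      simp only [pvValid, Bool.and_eq_true, decide_eq_true_eq]
      omega
    cases hp : pvPopMin heap with
    | none =>
      exfalso
      have hnil := (pvPopMin_none heap).mp hp
      subst hnil
      obtain ⟨m, hm⟩ := pvLB_exists ((pvCells n).map (pvW md))
      have hw : ∀ p, pvValid n p.1 p.2 = true → m ≤ pvW md p := fun p hp' =>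
        hm _ (List.mem_map_of_mem ((pvMem_cells n p).mpr hp'))
      have hre : pvReachR n (pvW md) m (n - 1, n - 1) :=
        ⟨hvs, hw (0, 0) hvs, pvConn n (pvW md) m hn hw⟩
      have hnv : ((n - 1 : Int), (n - 1 : Int)) ∉ visit := fun hc => by simpa using hee hc
      obtain ⟨y, hy, _⟩ := hcut m (n - 1, n - 1) hre (Or.inl hnv)
      simp at hy
    | some pr =>
      obtain ⟨x, rest⟩ := pr
      obtain ⟨negd, xr, xc⟩ := x
      obtain ⟨hperm, hmin⟩ := pvPopMin_spec heap _ _ hp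
      have hxheap : ((negd, xr, xc) : Int × Int × Int) ∈ heap := hperm.subset (List.mem_cons_self ..)
      obtain ⟨hxvis, hxreach, hxL, hxminL, hxz⟩ := hi1 _ hxheap
      simp only [pvDijkstra, hp]
      by_cases hbr : ((xr == n - 1) && (xc == n - 1)) = true
      · rw [if_pos hbr]
        simp only [Bool.and_eq_true, beq_iff_eq] at hbr
        obtain ⟨rfl, rfl⟩ := hbr
        refine ⟨hxreach, ?_, hxz⟩
        intro t hre
        obtain ⟨y, hy, hty, _, _⟩ := hcut t (n - 1, n - 1) hre
          (Or.inr (List.mem_map.mpr ⟨_, hxheap, rfl⟩))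
        have := hmin y hy
        simp only at this
        omega
      · rw [if_neg hbr]
        have hxcne : ((xr, xc) : Int × Int) ≠ (n - 1, n - 1) := by
          intro hc
          apply hbr
          simp only [Prod.mk.injEq] at hc
          simp [hc.1, hc.2]
        have hnodupcons : ((((negd, xr, xc) : Int × Int × Int) :: rest).map (·.2)).Nodup :=
          ((hperm.map (·.2)).nodup_iff).mpr hh2
        have hxnotrest : ((xr, xc) : Int × Int) ∉ rest.map (·.2) := (List.nodup_cons.mp hnodupcons).1
        have hrestnd : (rest.map (·.2)).Nodup := (List.nodup_cons.mp hnodupcons).2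
        have hFI0 : pvDFold n md (-negd) rest visit (rest, visit) := by
          refine ⟨?_, ⟨hvnd, hvval⟩, hrestnd, rfl, fun _ hp' => hp', ⟨[], by simp, by simp⟩, fun p hp' => Or.inl hp'⟩
          intro y hy
          have hyheap : y ∈ heap := hperm.subset (List.mem_cons_of_mem _ hy)
          obtain ⟨j1, j2, j3, j4, j5⟩ := hi1 y hyheap
          have hky : -y.1 ≤ -negd := by
            have := hmin y hyheap
            simp only at this
            omega
          refine ⟨j1, j2, hky, ?_, j5⟩
          rcases min_cases (-negd) (pvW md y.2) with ⟨he, hle⟩ | ⟨he, hle⟩ <;>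
            rcases min_cases L (pvW md y.2) with ⟨hf', hle'⟩ | ⟨hf', hle'⟩ <;>
            rw [he] <;> rw [hf'] at j4 <;> omega
        have hfold := pvDFold_step n md (-negd) (xr, xc) rest visit hxreach hxz
          (pvNbrs4 xr xc) (fun p hp' => hp') (rest, visit) hFI0
        obtain ⟨⟨j1, j2, j3, j4, j5, ⟨extra, hex, hexv⟩, j7⟩, hmono, hG⟩ := hfold
        set st := (pvNbrs4 xr xc).foldl (pvDStep n md (-negd)) (rest, visit) with hst
        have hpc' : ∀ p ∈ st.2, p ∉ st.1.map (·.2) → ∀ q, pvValid n q.1 q.2 = true →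
            q ∈ pvNbrs4 p.1 p.2 → q ∈ st.2 := by
          intro p hpv hpnot q hqv hqadj
          rcases j7 p hpv with hpvis | hpmap
          · by_cases hpx : p = (xr, xc)
            · subst hpx
              exact hG q hqadj hqv
            · have hpheap : p ∉ heap.map (·.2) := by
                intro hc
                have hc' : p ∈ (((negd, xr, xc) : Int × Int × Int) :: rest).map (·.2) :=
                  ((hperm.map (·.2)).mem_iff).mpr hc
                rcases List.mem_cons.mp hc' with hc' | hc'
                · exact hpx hc'
                · apply hpnot
                  rw [hex, List.map_append]
                  exact List.mem_append.mpr (Or.inl hc')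
              exact hmono (hpc p hpvis hpheap q hqv hqadj)
          · exact absurd hpmap hpnot
        have hkey' : ∀ y ∈ st.1, min (-negd) (pvW md y.2) ≤ -y.1 := fun y hy => (j1 y hy).2.2.2.1
        have hsub' : st.1.map (·.2) ⊆ st.2 := by
          intro p hp'
          obtain ⟨y, hy, rfl⟩ := List.mem_map.mp hp'
          exact (j1 y hy).1
        have hee' : ((n - 1 : Int), (n - 1 : Int)) ∈ st.2 → ((n - 1 : Int), (n - 1 : Int)) ∈ st.1.map (·.2) := by
          intro hev
          rcases j7 _ hev with hevis | hemap
          · have he2 : ((n - 1 : Int), (n - 1 : Int)) ∈ (((negd, xr, xc) : Int × Int × Int) :: rest).map (·.2) :=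
              ((hperm.map (·.2)).mem_iff).mpr (hee hevis)
            rcases List.mem_cons.mp he2 with he2 | he2
            · exact absurd he2.symm hxcne
            · rw [hex, List.map_append]
              exact List.mem_append.mpr (Or.inl he2)
          · exact hemap
        have hcut' : ∀ t z, pvReachR n (pvW md) t z → (z ∉ st.2 ∨ z ∈ st.1.map (·.2)) →
            ∃ y ∈ st.1, t ≤ -y.1 ∧ pvReachR n (pvW md) t y.2 ∧
              Relation.ReflTransGen (pvStepR n (pvW md) t) y.2 z := by
          intro t z hrz hcond
          have hcond0 : z ∉ visit ∨ z ∈ heap.map (·.2) := by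
            rcases hcond with hz | hz
            · exact Or.inl (fun hc => hz (hmono hc))
            · rw [hex, List.map_append] at hz
              rcases List.mem_append.mp hz with hz | hz
              · refine Or.inr ?_
                obtain ⟨y, hy, rfl⟩ := List.mem_map.mp hz
                exact List.mem_map.mpr ⟨y, hperm.subset (List.mem_cons_of_mem _ hy), rfl⟩
              · obtain ⟨y, hy, rfl⟩ := List.mem_map.mp hz
                exact Or.inl (hexv y hy)
          obtain ⟨y0, hy0, hty0, hry0, hpath0⟩ := hcut t z hrz hcond0
          have hkt : t ≤ -negd := by
            have := hmin y0 hy0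
            simp only at this
            omega
          exact pvWalk n md t (-negd) st.1 st.2 hkt hpc' hkey' y0.2 z hpath0
            (hmono (hhsub (List.mem_map.mpr ⟨y0, hy0, rfl⟩))) hry0
            (pvReachR_le_w n (pvW md) t y0.2 hry0) hcond
        have hfuel' : st.1.length + 2 * (n.toNat * n.toNat - st.2.length) + 1 ≤ fuel := by
          have hlen := hperm.length_eq
          simp only [List.length_cons] at hlen
          have hstle : st.2.length ≤ n.toNat * n.toNat := pvSize_bound n st.2 j2.1 j2.2
          have hvle : visit.length ≤ st.2.length := (List.subperm_of_subset hvnd j5).length_le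
          omega
        exact ih (-negd) st.1 st.2 ⟨j1, j2, j3, hpc', hee', hcut', hsub'⟩ hfuel' 

lemma pvScan_spec (n : Int) (md : PySem.Dict (Int × Int) Int) (r : Int) :
    ∀ (cands : List Int), r ∈ cands →
    (∀ c ∈ cands, (pvReachable n md c = true ↔ pvReachR n (pvW md) c (n - 1, n - 1))) →
    pvReachR n (pvW md) r (n - 1, n - 1) →
    (∀ t, pvReachR n (pvW md) t (n - 1, n - 1) → t ≤ r) →
    cands.Pairwise (· > ·) →
    pvScan n md cands = r := by
  intro cands
  induction cands with
  | nil => intro h; simp at h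
  | cons c cs ih =>
    intro hmem hiff hre hmax hpw
    by_cases hcr : c = r
    · subst hcr
      have : pvReachable n md c = true := (hiff c (List.mem_cons_self ..)).mpr hre
      simp [pvScan, this]
    · have hrtail : r ∈ cs := by
        rcases List.mem_cons.mp hmem with h | h
        · exact absurd h.symm hcr
        · exact h
      have hcr' : c > r := (List.pairwise_cons.mp hpw).1 r hrtail
      have hnot : pvReachable n md c ≠ true := by
        intro hc
        have := hmax c ((hiff c (List.mem_cons_self ..)).mp hc)
        omega
      simp only [pvScan, if_neg hnot]
      exact ih hrtail (fun d hd => hiff d (List.mem_cons_of_mem _ hd)) hre hmax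
        (List.pairwise_cons.mp hpw).2

-- ===== VERDICT (by name: the statement is the Claim_ definition above) =====
theorem maximumSafenesFactor_spec : Claim_equal_maximumSafenesFactor := by
  intro grid _ hpre
  obtain ⟨hn1, _, _⟩ := hpre
  unfold Spec_maximumSafenesFactor
  have hn' : 1 ≤ (grid.length : Int) := by exact_mod_cast hn1
  set n : Int := (grid.length : Int) with hn
  set md := pvMinDist grid n with hmd
  have hvs : pvValid n 0 0 = true := by
    simp only [pvValid, Bool.and_eq_true, decide_eq_true_eq]
    omega
  have hadd : PySem.Set.add PySem.Set.empty ((0 : Int), (0 : Int)) = [((0 : Int), (0 : Int))] := rfl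
  have hsq : 1 ≤ n.toNat * n.toNat := by
    have hm : 1 ≤ n.toNat := by omega
    exact Nat.mul_le_mul hm hm
  have hinv : pvDInv n md (md.getD (0, 0) 0) [(-(md.getD (0, 0) 0), 0, 0)]
      (PySem.Set.add PySem.Set.empty (0, 0)) := by
    refine ⟨?_, ?_, by simp, ?_, ?_, ?_, ?_⟩
    · intro y hy
      rw [List.mem_singleton] at hy
      subst hy
      simp only [neg_neg]
      refine ⟨by rw [hadd]; simp, ⟨hvs, le_refl _, Relation.ReflTransGen.refl⟩, le_refl _, ?_, ⟨(0, 0), hvs, rfl⟩⟩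
      have : pvW md ((0 : Int), (0 : Int)) = md.getD (0, 0) 0 := rfl
      rw [this, min_self]
    · rw [hadd]
      refine ⟨List.nodup_singleton _, ?_⟩
      intro p hp
      rw [List.mem_singleton] at hp
      subst hp
      exact hvs
    · intro p hp hpn q _ _
      rw [hadd, List.mem_singleton] at hp
      subst hp
      exact absurd (by simp) hpn
    · intro hev
      rw [hadd, List.mem_singleton] at hev
      rw [hev]
      simp
    · intro t z hrz _
      refine ⟨(-(md.getD (0, 0) 0), 0, 0), List.mem_singleton.mpr rfl, ?_, ?_, ?_⟩
      · simp only [neg_neg]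
        exact hrz.2.1
      · exact ⟨hvs, hrz.2.1, Relation.ReflTransGen.refl⟩
      · exact hrz.2.2
    · intro p hp
      simp only [List.map_cons, List.map_nil, List.mem_singleton] at hp
      rw [hadd, hp]
      simp
  have hfuel : ([(-(md.getD (0, 0) 0), (0 : Int), (0 : Int))].length) +
      2 * (n.toNat * n.toNat - (PySem.Set.add PySem.Set.empty ((0 : Int), (0 : Int))).length) + 1 ≤
      2 * n.toNat * n.toNat + 2 := by
    rw [hadd]
    simp only [List.length_singleton]
    have hmul : 2 * n.toNat * n.toNat = 2 * (n.toNat * n.toNat) := by ring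
    omega
  obtain ⟨hra, hmax, ⟨z0, hz0v, hz0e⟩⟩ := pvDijkstra_main n md hn' (2 * n.toNat * n.toNat + 2)
    (md.getD (0, 0) 0) [(-(md.getD (0, 0) 0), 0, 0)] (PySem.Set.add PySem.Set.empty (0, 0)) hinv hfuel
  have hA : maximumSafenesFactor grid = pvDijkstra n md (2 * n.toNat * n.toNat + 2)
      [(-(md.getD (0, 0) 0), 0, 0)] (PySem.Set.add PySem.Set.empty (0, 0)) := rfl
  have hB : maximumSafenesFactor_alt grid =
      pvScan n md (PySem.List.sorted (PySem.Set.ofList (pvVals n md)) (fun x => x) true) := rfl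
  rw [hA, hB]
  have hrc : pvDijkstra n md (2 * n.toNat * n.toNat + 2) [(-(md.getD (0, 0) 0), 0, 0)]
      (PySem.Set.add PySem.Set.empty (0, 0)) ∈
      PySem.List.sorted (PySem.Set.ofList (pvVals n md)) (fun x => x) true := by
    rw [PySem.List.mem_sorted, PySem.Set.mem_ofList, pvVals_eq]
    exact List.mem_map.mpr ⟨z0, (pvMem_cells n z0).mpr hz0v, hz0e.symm⟩
  have hpw : (PySem.List.sorted (PySem.Set.ofList (pvVals n md)) (fun x => x) true).Pairwise (· > ·) := by
    have hpge := PySem.List.sorted_pairwise_rev (PySem.Set.ofList (pvVals n md)) (fun x => x)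
    have hnd : (PySem.List.sorted (PySem.Set.ofList (pvVals n md)) (fun x => x) true).Nodup :=
      ((PySem.List.sorted_perm (PySem.Set.ofList (pvVals n md)) (fun x => x) true).nodup_iff).mpr
        (PySem.Set.nodup_ofList _)
    exact (List.Pairwise.and hpge hnd).imp (fun h => lt_of_le_of_ne h.1 h.2.symm)
  exact (pvScan_spec n md _ _ hrc (fun c _ => pvReachable_iff n md c hn') hra hmax hpw).symm
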